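-- pv_equiv track=rewrite | github.com/bipsec/ai-security | ui/secured_chatbot.py | _detect_response_quality
-- ===== SOURCE A (Python) =====
-- _REDIRECT_PHRASES = [
--     "i don't have enough information",
--     "i cannot access personal",
--     "i cannot provide",
--     "please contact support",
--     "please contact our support",
--     "please check your account",
--     "please refer to the official",
--     "i'm sorry, i cannot",
--     "i am sorry, i cannot",
--     "i'm unable to",
--     "for your security",
--     "contact support@finnova.com",
-- ]
--
-- def _detect_response_quality(response_text: str) -> str:
--     """Detect if response is grounded or redirected to support."""
--     lower = response_text.lower()
--     for phrase in _REDIRECT_PHRASES: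
--         if phrase in lower:
--             return "redirected"
--     if len(response_text.strip()) < 50:
--         return "minimal"
--     return "grounded"
-- ===== SOURCE B (Python) =====
-- _REDIRECT_PHRASES = [
--     "i don't have enough information",
--     "i cannot access personal",
--     "i cannot provide",
--     "please contact support",
--     "please contact our support",
--     "please check your account",
--     "please refer to the official",
--     "i'm sorry, i cannot",
--     "i am sorry, i cannot",
--     "i'm unable to",
--     "for your security",
--     "contact support@finnova.com",
-- ]
--
-- # Index the phrases once by their first character; scanning then checks, at
-- # each position of the lowered text, only the phrases that could start there.
-- _BY_FIRST = {}
-- for _p in _REDIRECT_PHRASES: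
--     _BY_FIRST[_p[0]] = _BY_FIRST.get(_p[0], []) + [_p]
--
--
-- def _detect_response_quality(response_text: str) -> str:
--     """One left-to-right scan of the lowered text with a first-character index
--     instead of twelve independent substring searches."""
--     lower = response_text.lower()
--     for i, ch in enumerate(lower):
--         for p in _BY_FIRST.get(ch, []):
--             if lower.startswith(p, i):
--                 return "redirected"
--     if len(response_text.strip()) < 50:
--         return "minimal"
--     return "grounded"
-- ===== Notes on version B (the rewrite author's own statement) =====
-- stated objective: alternative
-- what changed: A runs twelve independent substring searches over the lowered text, one per redirect phrase; B builds a dict indexing the phrases by their first character once at module level and makes a single left-to-right scan of the lowered text, prefix-checking at each position only the phrases whose first character matches.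
import Mathlib
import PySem

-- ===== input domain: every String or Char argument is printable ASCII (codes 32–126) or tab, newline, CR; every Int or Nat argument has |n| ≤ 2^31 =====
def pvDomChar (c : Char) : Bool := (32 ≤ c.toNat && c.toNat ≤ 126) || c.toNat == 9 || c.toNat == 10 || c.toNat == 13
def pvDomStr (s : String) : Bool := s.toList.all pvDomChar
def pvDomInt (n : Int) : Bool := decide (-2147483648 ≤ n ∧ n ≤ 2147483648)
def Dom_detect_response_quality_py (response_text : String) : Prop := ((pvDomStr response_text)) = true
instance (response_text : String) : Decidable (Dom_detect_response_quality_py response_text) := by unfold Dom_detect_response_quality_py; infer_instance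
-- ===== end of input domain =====

-- B replaces A's twelve independent substring scans by a dict indexing the phrases by
-- first character, built once, and a single left-to-right scan of the lowered text that
-- prefix-checks only the candidate phrases at each position (alternative).

def pvRedirectPhrases : List String := [
  "i don't have enough information",
  "i cannot access personal",
  "i cannot provide",
  "please contact support",
  "please contact our support",
  "please check your account",
  "please refer to the official",
  "i'm sorry, i cannot",
  "i am sorry, i cannot",
  "i'm unable to",
  "for your security",
  "contact support@finnova.com"]

-- ===== PORT A =====
-- the for-loop over phrases with early return, as recursion over the phrase list
def pvALoop (lower : String) : List String → Bool
  | [] => false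
  | p :: ps => if PySem.Str.isIn p lower then true else pvALoop lower ps

def detect_response_quality_py (response_text : String) : String :=
  let lower := PySem.Str.lower response_text
  if pvALoop lower pvRedirectPhrases then "redirected"
  else if PySem.Str.len (PySem.Str.strip response_text) < 50 then "minimal"
  else "grounded"

-- ===== PORT B =====
-- module-level index: _BY_FIRST[p[0]] = _BY_FIRST.get(p[0], []) + [p]
-- (p[0] ported as headI: exact here, every phrase in the literal list is nonempty)
def pvByFirst : PySem.Dict Char (List String) :=
  pvRedirectPhrases.foldl
    (fun d p => d.insert p.toList.headI (d.getD p.toList.headI [] ++ [p]))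
    PySem.Dict.empty

-- the 'for i, ch in enumerate(lower)' loop with the inner candidate loop, as
-- recursion over the suffixes of the lowered text
def pvBScan : List Char → Bool
  | [] => false
  | c :: rest =>
      if (pvByFirst.getD c []).any (fun p => PySem.Chars.startswith (c :: rest) p.toList) then true
      else pvBScan rest

def detect_response_quality_py_alt (response_text : String) : String :=
  let lower := PySem.Str.lower response_text
  if pvBScan lower.toList then "redirected"
  else if PySem.Str.len (PySem.Str.strip response_text) < 50 then "minimal"
  else "grounded"

-- ===== PRECONDITION & SPEC =====
def Spec_detect_response_quality_py (response_text : String) (out : String) : Prop := out = detect_response_quality_py_alt response_text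
instance (response_text : String) (out : String) : Decidable (Spec_detect_response_quality_py response_text out) := by unfold Spec_detect_response_quality_py; infer_instance

-- ===== CLAIM (what is proved, stated in full; the proofs are below) =====
def Claim_equal_detect_response_quality_py : Prop := ∀ (response_text : String), Dom_detect_response_quality_py response_text → Spec_detect_response_quality_py response_text (detect_response_quality_py response_text)

-- ===== LEMMAS AND PROOFS =====

theorem pvALoop_iff (lower : String) (phs : List String) :
    pvALoop lower phs = true ↔ ∃ p ∈ phs, PySem.Str.isIn p lower = true := by
  induction phs with
  | nil => simp [pvALoop]
  | cons p ps ih =>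
    simp only [pvALoop, List.mem_cons]
    split_ifs with h
    · constructor
      · intro _; exact ⟨p, Or.inl rfl, h⟩
      · intro _; rfl
    · rw [ih]
      constructor
      · rintro ⟨q, hq, hin⟩; exact ⟨q, Or.inr hq, hin⟩
      · rintro ⟨q, hq | hq, hin⟩
        · subst hq; exact absurd hin h
        · exact ⟨q, hq, hin⟩

theorem pvByFirst_getD (c : Char) : pvByFirst.getD c [] =
    if c = 'i' then
      ["i don't have enough information", "i cannot access personal", "i cannot provide",
       "i'm sorry, i cannot", "i am sorry, i cannot", "i'm unable to"]
    else if c = 'p' then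
      ["please contact support", "please contact our support", "please check your account",
       "please refer to the official"]
    else if c = 'f' then ["for your security"]
    else if c = 'c' then ["contact support@finnova.com"]
    else [] := by
  by_cases h1 : c = 'i'
  · subst h1; decide
  by_cases h2 : c = 'p'
  · subst h2; decide
  by_cases h3 : c = 'f'
  · subst h3; decide
  by_cases h4 : c = 'c'
  · subst h4; decide
  rw [if_neg h1, if_neg h2, if_neg h3, if_neg h4]
  have h : pvByFirst = PySem.Dict.mk
      [('i', ["i don't have enough information", "i cannot access personal", "i cannot provide",
              "i'm sorry, i cannot", "i am sorry, i cannot", "i'm unable to"]),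
       ('p', ["please contact support", "please contact our support", "please check your account",
              "please refer to the official"]),
       ('f', ["for your security"]),
       ('c', ["contact support@finnova.com"])] := by decide
  rw [h, PySem.Dict.getD_eq_get?_getD]
  simp only [PySem.Dict.get?_mk_cons, beq_iff_eq]
  rw [if_neg (fun hx => h1 hx.symm), if_neg (fun hx => h2 hx.symm),
      if_neg (fun hx => h3 hx.symm), if_neg (fun hx => h4 hx.symm)]
  rfl

theorem pv_mem_getD_iff (c : Char) (p : String) :
    p ∈ pvByFirst.getD c [] ↔ p ∈ pvRedirectPhrases ∧ p.toList.head? = some c := by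
  rw [pvByFirst_getD]
  split_ifs with h1 h2 h3 h4
  · subst h1
    constructor
    · intro h; fin_cases h <;> exact ⟨by decide, by decide⟩
    · rintro ⟨hp, hh⟩; fin_cases hp <;> revert hh <;> decide
  · subst h2
    constructor
    · intro h; fin_cases h <;> exact ⟨by decide, by decide⟩
    · rintro ⟨hp, hh⟩; fin_cases hp <;> revert hh <;> decide
  · subst h3
    constructor
    · intro h; fin_cases h <;> exact ⟨by decide, by decide⟩
    · rintro ⟨hp, hh⟩; fin_cases hp <;> revert hh <;> decide
  · subst h4
    constructor
    · intro h; fin_cases h <;> exact ⟨by decide, by decide⟩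
    · rintro ⟨hp, hh⟩; fin_cases hp <;> revert hh <;> decide
  · simp only [List.not_mem_nil, false_iff, not_and]
    intro hp hh
    fin_cases hp <;> simp at hh <;>
      first | exact h1 hh.symm | exact h2 hh.symm | exact h3 hh.symm | exact h4 hh.symm

theorem pv_phrases_ne_nil : ∀ p ∈ pvRedirectPhrases, p.toList ≠ [] := by decide

theorem pvBScan_iff (l : List Char) :
    pvBScan l = true ↔ ∃ p ∈ pvRedirectPhrases, ∃ j, p.toList <+: l.drop j := by
  induction l with
  | nil =>
    simp only [pvBScan]
    constructor
    · intro h; exact absurd h (by decide)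
    · rintro ⟨p, hp, j, hpre⟩
      exact (pv_phrases_ne_nil p hp (List.prefix_nil.mp (by simpa using hpre))).elim
  | cons c rest ih =>
    simp only [pvBScan]
    split_ifs with h
    · simp only [true_iff]
      rcases List.any_eq_true.mp h with ⟨p, hp, hpre⟩
      exact ⟨p, ((pv_mem_getD_iff c p).mp hp).1, 0,
        by simpa using (PySem.Chars.startswith_iff _ _).mp hpre⟩
    · rw [ih]
      constructor
      · rintro ⟨p, hp, j, hpre⟩; exact ⟨p, hp, j + 1, by simpa using hpre⟩
      · rintro ⟨p, hp, j, hpre⟩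
        cases j with
        | zero =>
          exfalso; apply h
          simp only [List.drop_zero] at hpre
          have hne := pv_phrases_ne_nil p hp
          have hhead : p.toList.head? = some c := by
            cases hpt : p.toList with
            | nil => exact absurd hpt hne
            | cons a as =>
              rw [hpt] at hpre
              obtain ⟨rfl, -⟩ := List.cons_prefix_cons.mp hpre
              rfl
          exact List.any_eq_true.mpr ⟨p, (pv_mem_getD_iff c p).mpr ⟨hp, hhead⟩,
            (PySem.Chars.startswith_iff _ _).mpr hpre⟩
        | succ k => exact ⟨p, hp, k, by simpa using hpre⟩

theorem pv_scan_eq (lower : String) :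
    pvBScan lower.toList = pvALoop lower pvRedirectPhrases := by
  rcases Bool.eq_false_or_eq_true (pvALoop lower pvRedirectPhrases) with hA | hA
  · rw [hA]
    rcases (pvALoop_iff _ _).mp hA with ⟨p, hp, hin⟩
    rw [PySem.Str.isIn_eq] at hin
    rcases (PySem.Chars.exists_prefix_drop_iff_isIn _ _).mpr hin with ⟨j, hpre⟩
    exact (pvBScan_iff _).mpr ⟨p, hp, j, hpre⟩
  · rw [hA]
    rw [Bool.eq_false_iff]
    intro hB
    rcases (pvBScan_iff _).mp hB with ⟨p, hp, j, hpre⟩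
    have : PySem.Str.isIn p lower = true := by
      rw [PySem.Str.isIn_eq]
      exact (PySem.Chars.exists_prefix_drop_iff_isIn _ _).mp ⟨j, hpre⟩
    rw [Bool.eq_false_iff] at hA
    exact hA ((pvALoop_iff _ _).mpr ⟨p, hp, this⟩)

-- ===== VERDICT (by name: the statement is the Claim_ definition above) =====
theorem detect_response_quality_py_spec : Claim_equal_detect_response_quality_py := by
  intro response_text _
  unfold Spec_detect_response_quality_py detect_response_quality_py detect_response_quality_py_alt
  simp only [pv_scan_eq]
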